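-- pv_equiv track=rewrite | github.com/rbergmair/recruitment_challenge | so1rb_explore/bin_step22_information_by_feature_pp.py | convert_to_ntile
-- ===== SOURCE A (Python) =====
-- def convert_to_ntile( val, boundaries ):
--
--   boundaries = [ None ] + boundaries + [ None ];
--
--   for i in range( 0, len(boundaries)-1 ):
--
--     lower = boundaries[ i ];
--     upper = boundaries[ i+1 ];
--
--     assert not ( lower is None and upper is None );
--
--     if lower is None:
--       assert upper is not None;
--       if val <= upper:
--         return i;
--
--     if upper is None:
--       assert lower is not None;
--       if lower < val:
--         return i;
--
--     if ( lower is not None ) and ( upper is not None ):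
--       if lower < val <= upper:
--         return i;
-- ===== SOURCE B (Python) =====
-- def convert_to_ntile(val, boundaries):
--     # Bucket = smallest index whose boundary is >= val; above all boundaries
--     # the value falls in the last, open-ended bucket.
--     hits = [j for j, b in enumerate(boundaries) if val <= b]
--     return min(hits) if hits else len(boundaries)
-- ===== Notes on version B (the rewrite author's own statement) =====
-- stated objective: alternative
-- what changed: B drops A's None-sentinel padding and early-exit scan over adjacent (lower, upper] interval pairs; it instead stages two passes — collect every index whose boundary is >= val, then take the minimum (defaulting to len(boundaries)).
import Mathlib
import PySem

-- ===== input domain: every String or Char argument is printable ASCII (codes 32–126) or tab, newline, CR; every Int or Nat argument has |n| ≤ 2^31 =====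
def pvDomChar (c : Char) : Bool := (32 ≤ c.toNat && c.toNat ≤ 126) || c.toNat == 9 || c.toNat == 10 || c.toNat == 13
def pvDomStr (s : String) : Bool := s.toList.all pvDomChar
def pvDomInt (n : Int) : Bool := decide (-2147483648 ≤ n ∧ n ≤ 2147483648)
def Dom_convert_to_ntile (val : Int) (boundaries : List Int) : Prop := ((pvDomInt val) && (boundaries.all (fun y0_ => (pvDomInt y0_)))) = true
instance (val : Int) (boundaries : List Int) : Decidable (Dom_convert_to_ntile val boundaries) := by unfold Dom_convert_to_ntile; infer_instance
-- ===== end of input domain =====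

-- B replaces A's early-exit scan over None-sentinel-padded adjacent interval pairs by two staged
-- passes: collect every index whose boundary is >= val, then take the minimum (default len).


-- ===== PORT A =====
-- A's for-loop over i = 0 .. len(bs)-2 reading bs[i], bs[i+1]: walked as the obvious
-- structural recursion over adjacent pairs of the padded list, carrying the index i.
-- The both-None case is A's failing assert (only reachable for empty boundaries,
-- excluded by Pre_); the port returns none there, as on loop fall-through.
def convertToNtileLoopA (val : Int) (i : Nat) : List (Option Int) → Option Int
  | lower :: upper :: rest =>
    match lower, upper with
    | none, none => none
    | none, some u => if val ≤ u then some (i : Int) else convertToNtileLoopA val (i + 1) (upper :: rest)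
    | some l, none => if l < val then some (i : Int) else convertToNtileLoopA val (i + 1) (upper :: rest)
    | some l, some u => if l < val ∧ val ≤ u then some (i : Int) else convertToNtileLoopA val (i + 1) (upper :: rest)
  | _ => none

def convert_to_ntile (val : Int) (boundaries : List Int) : Option Int :=
  convertToNtileLoopA val 0 ([none] ++ boundaries.map some ++ [none])

-- ===== PORT B =====
-- Source B: hits = [j for j, b in enumerate(boundaries) if val <= b]; min(hits) if hits else len.
def convert_to_ntile_alt (val : Int) (boundaries : List Int) : Option Int :=
  let hits := (PySem.List.enumerate boundaries 0).filterMap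
    (fun p => if val ≤ p.2 then some p.1 else none)
  match PySem.List.min? hits (fun j => j) with
  | some m => some m
  | none => some (boundaries.length : Int)

-- ===== PRECONDITION & SPEC =====
-- Pre_ excludes only the empty boundary list, on which A raises AssertionError
-- (its padded list is [None, None]); B returns 0 there.
def Pre_convert_to_ntile (val : Int) (boundaries : List Int) : Prop := boundaries ≠ []
instance (val : Int) (boundaries : List Int) : Decidable (Pre_convert_to_ntile val boundaries) := by
  unfold Pre_convert_to_ntile; infer_instance

def pvWitness_convert_to_ntile : Int × List Int := (3, [1, 5, 9])

def Spec_convert_to_ntile (val : Int) (boundaries : List Int) (out : Option Int) : Prop := out = convert_to_ntile_alt val boundaries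
instance (val : Int) (boundaries : List Int) (out : Option Int) : Decidable (Spec_convert_to_ntile val boundaries out) := by unfold Spec_convert_to_ntile; infer_instance

-- ===== CLAIM (what is proved, stated in full; the proofs are below) =====
def Claim_equal_convert_to_ntile : Prop := ∀ (val : Int) (boundaries : List Int), Dom_convert_to_ntile val boundaries → Pre_convert_to_ntile val boundaries → Spec_convert_to_ntile val boundaries (convert_to_ntile val boundaries)

-- ===== LEMMAS AND PROOFS =====

-- Proof-side scan: the first index j (counted from a start offset) with val ≤ bs[j], else the length.
def scanFirst (val : Int) (j : Int) : List Int → Option Int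
  | [] => some j
  | b :: rest => if val ≤ b then some j else scanFirst val (j + 1) rest

-- A's padded pair-window walk equals the first-match scan.
theorem loopA_eq_scanFirst (val : Int) :
    ∀ (xs : List Int) (prev : Int) (j : Nat), prev < val →
      convertToNtileLoopA val j (some prev :: xs.map some ++ [none]) =
        scanFirst val (j : Int) xs := by
  intro xs
  induction xs with
  | nil =>
      intro prev j hprev
      simp [convertToNtileLoopA, scanFirst, hprev]
  | cons x rest ih =>
      intro prev j hprev
      by_cases hx : val ≤ x
      · simp [convertToNtileLoopA, scanFirst, hx, hprev]
      · have hx' : x < val := by omega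
        have hno : ¬ (prev < val ∧ val ≤ x) := by omega
        simp only [List.map_cons, List.cons_append, convertToNtileLoopA, if_neg hno,
          scanFirst, if_neg hx]
        have h2 := ih x (j + 1) hx'
        push_cast at h2
        exact h2

-- A (on a nonempty list) equals the first-match scan from offset 0.
theorem A_eq_scanFirst (val x : Int) (rest : List Int) :
    convert_to_ntile val (x :: rest) = scanFirst val 0 (x :: rest) := by
  by_cases hx : val ≤ x
  · simp [convert_to_ntile, convertToNtileLoopA, scanFirst, hx]
  · have hx' : x < val := by omega
    simp only [convert_to_ntile, scanFirst, List.map_cons, List.cons_append,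
      List.nil_append, convertToNtileLoopA, if_neg hx]
    have h2 := loopA_eq_scanFirst val rest x 1 hx'
    push_cast at h2
    simpa using h2

-- B's computation, generalized over the enumeration offset s, for the induction.
def altAux (val : Int) (s : Int) (bs : List Int) : Option Int :=
  match PySem.List.min? ((PySem.List.enumerate bs s).filterMap
      (fun p => if val ≤ p.2 then some p.1 else none)) (fun j => j) with
  | some m => some m
  | none => some (s + (bs.length : Int))

theorem foldl_min_const {l : List Int} (a : Int) (h : ∀ y ∈ l, a ≤ y) :
    l.foldl min a = a := by
  induction l with
  | nil => rfl
  | cons y t ih =>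
      have hy : a ≤ y := h y (List.mem_cons_self)
      simp only [List.foldl_cons, min_eq_left hy]
      exact ih (fun z hz => h z (List.mem_cons_of_mem _ hz))

-- every index collected from an enumeration starting at s is ≥ s
theorem hits_lb (val s : Int) (bs : List Int) :
    ∀ y ∈ (PySem.List.enumerate bs s).filterMap
      (fun p => if val ≤ p.2 then some p.1 else none), s ≤ y := by
  intro y hy
  obtain ⟨p, hp, hf⟩ := List.mem_filterMap.mp hy
  obtain ⟨k, hk, rfl⟩ := (PySem.List.mem_enumerate_iff bs s p).mp hp
  by_cases h : val ≤ bs[k]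
  · simp [h] at hf; omega
  · simp [h] at hf

-- the staged filter + min computation agrees with the first-match scan
theorem scanFirst_eq_altAux (val : Int) :
    ∀ (bs : List Int) (s : Int), scanFirst val s bs = altAux val s bs := by
  intro bs
  induction bs with
  | nil =>
      intro s
      simp [scanFirst, altAux, PySem.List.enumerate_nil, PySem.List.min?]
  | cons x rest ih =>
      intro s
      by_cases hx : val ≤ x
      · have hmin : PySem.List.min?
            (s :: (PySem.List.enumerate rest (s + 1)).filterMap
              (fun p => if val ≤ p.2 then some p.1 else none)) (fun j => j) = some s := by
          rw [PySem.List.min?_id_cons]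
          congr 1
          exact foldl_min_const s
            (fun y hy => le_trans (by omega) (hits_lb val (s + 1) rest y hy))
        simp only [scanFirst, if_pos hx, altAux, PySem.List.enumerate_cons]
        simp only [List.filterMap_cons, if_pos hx]
        rw [hmin]
      · have hstep : (PySem.List.enumerate (x :: rest) s).filterMap
              (fun p => if val ≤ p.2 then some p.1 else none) =
            (PySem.List.enumerate rest (s + 1)).filterMap
              (fun p => if val ≤ p.2 then some p.1 else none) := by
          rw [PySem.List.enumerate_cons]
          simp [hx]
        simp only [scanFirst, if_neg hx, altAux, hstep]
        rw [ih (s + 1)]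
        simp only [altAux]
        have harm : ∀ (o : Option Int),
            (match o with
              | some m => some m
              | none => some (s + 1 + (rest.length : Int))) =
              (match o with
              | some m => some m
              | none => some (s + ((x :: rest).length : Int))) := by
          intro o
          cases o with
          | some m => rfl
          | none => simp only [List.length_cons]; congr 1; push_cast; ring
        exact harm _

-- ===== VERDICT (by name: the statement is the Claim_ definition above) =====
theorem convert_to_ntile_spec : Claim_equal_convert_to_ntile := by
  intro val boundaries _ hpre
  unfold Spec_convert_to_ntile
  cases boundaries with
  | nil => exact absurd rfl hpre
  | cons x rest =>
      rw [A_eq_scanFirst, scanFirst_eq_altAux]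
      simp [altAux, convert_to_ntile_alt]
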